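-- pv_equiv track=rewrite | github.com/Spitfire-Products/Arkival-V4 | codebase_summary/update_project_summary.py | _detect_ai_providers
-- ===== SOURCE A (Python) =====
-- from typing import Dict, Any, List
--
-- def _detect_ai_providers(ai_files: List[str]) -> List[str]:
--     """Detect AI providers from file names and paths"""
--     providers = []
--     provider_patterns = {
--         "OpenAI": ["openai", "gpt", "chatgpt"],
--         "Claude": ["claude", "anthropic"],
--         "Google": ["gemini", "palm", "bard", "google-ai"],
--         "Hugging Face": ["huggingface", "transformers"],
--         "Cohere": ["cohere"],
--         "Azure": ["azure", "cognitive"],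
--         "Custom": ["model", "llm", "ai"]
--     }
--
--     for provider, patterns in provider_patterns.items():
--         for file in ai_files:
--             if any(pattern in file.lower() for pattern in patterns):
--                 if provider not in providers:
--                     providers.append(provider)
--
--     return providers if providers else ["Unknown"]
-- ===== SOURCE B (Python) =====
-- from typing import Dict, Any, List
--
-- def _detect_ai_providers(ai_files: List[str]) -> List[str]:
--     """Detect AI providers from file names and paths.
--
--     Join all file names into one space-separated blob (lowered once) and run each
--     pattern search against that single string: no pattern contains a space, so a
--     pattern occurs in the blob exactly when it occurs in some file name.
--     """
--     provider_patterns = {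
--         "OpenAI": ["openai", "gpt", "chatgpt"],
--         "Claude": ["claude", "anthropic"],
--         "Google": ["gemini", "palm", "bard", "google-ai"],
--         "Hugging Face": ["huggingface", "transformers"],
--         "Cohere": ["cohere"],
--         "Azure": ["azure", "cognitive"],
--         "Custom": ["model", "llm", "ai"]
--     }
--     blob = " ".join(ai_files).lower()
--     providers = [prov for prov, pats in provider_patterns.items()
--                  if any(p in blob for p in pats)]
--     return providers if providers else ["Unknown"]
-- ===== Notes on version B (the rewrite author's own statement) =====
-- stated objective: faster
-- what changed: B joins all file names into one space-separated string lowered once and runs each of the 19 pattern searches against that single blob (correct because no pattern contains a space, so a match cannot cross a file boundary), replacing A's nested per-provider/per-file loops that re-lower every file for every provider and maintain a dedup list.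
import Mathlib
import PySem

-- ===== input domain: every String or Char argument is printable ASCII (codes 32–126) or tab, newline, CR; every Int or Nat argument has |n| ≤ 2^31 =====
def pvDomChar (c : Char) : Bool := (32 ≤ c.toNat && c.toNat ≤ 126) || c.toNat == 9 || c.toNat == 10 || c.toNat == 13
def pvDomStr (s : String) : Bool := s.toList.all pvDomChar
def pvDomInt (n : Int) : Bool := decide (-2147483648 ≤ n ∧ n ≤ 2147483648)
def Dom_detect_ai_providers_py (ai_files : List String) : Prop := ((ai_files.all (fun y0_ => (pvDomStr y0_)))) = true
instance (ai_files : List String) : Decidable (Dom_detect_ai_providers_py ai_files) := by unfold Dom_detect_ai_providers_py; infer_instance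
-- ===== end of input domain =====

-- B joins all file names into one space-separated blob lowered once and searches each
-- pattern in that single string (no pattern contains a space, so a match cannot cross a
-- file boundary), replacing A's nested per-provider/per-file loops and dedup list with a
-- single filter over the pattern table; same return value.

-- the provider_patterns dict (insertion order), shared literal data of both versions
def pvProviderPatterns : List (String × List String) :=
  [("OpenAI", ["openai", "gpt", "chatgpt"]),
   ("Claude", ["claude", "anthropic"]),
   ("Google", ["gemini", "palm", "bard", "google-ai"]),
   ("Hugging Face", ["huggingface", "transformers"]),
   ("Cohere", ["cohere"]),
   ("Azure", ["azure", "cognitive"]),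
   ("Custom", ["model", "llm", "ai"])]

-- ===== PORT A =====
def detect_ai_providers_py (ai_files : List String) : List String :=
  let providers :=
    pvProviderPatterns.foldl (fun acc e =>
      ai_files.foldl (fun acc2 file =>
        if e.2.any (fun pat => PySem.Str.isIn pat (PySem.Str.lower file)) then
          if acc2.contains e.1 then acc2 else acc2 ++ [e.1]
        else acc2) acc) []
  if providers.isEmpty then ["Unknown"] else providers

-- ===== PORT B =====
def detect_ai_providers_py_alt (ai_files : List String) : List String :=
  let blob := PySem.Str.lower (PySem.Str.join " " ai_files)
  let providers :=
    (pvProviderPatterns.filter (fun e => e.2.any (fun p => PySem.Str.isIn p blob))).map Prod.fst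
  if providers.isEmpty then ["Unknown"] else providers

-- ===== PRECONDITION & SPEC =====
def Spec_detect_ai_providers_py (ai_files : List String) (out : List String) : Prop := out = detect_ai_providers_py_alt ai_files
instance (ai_files : List String) (out : List String) : Decidable (Spec_detect_ai_providers_py ai_files out) := by unfold Spec_detect_ai_providers_py; infer_instance

-- ===== CLAIM (what is proved, stated in full; the proofs are below) =====
def Claim_equal_detect_ai_providers_py : Prop := ∀ (ai_files : List String), Dom_detect_ai_providers_py ai_files → Spec_detect_ai_providers_py ai_files (detect_ai_providers_py ai_files)

-- ===== LEMMAS AND PROOFS =====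

-- some file's lowercase form contains one of the patterns (A's match condition per provider)
def pvMatch (ai_files : List String) (ps : List String) : Bool :=
  ai_files.any (fun file => ps.any (fun pat => PySem.Str.isIn pat (PySem.Str.lower file)))

-- A's inner loop over the files: appends n once iff some file matches and n is fresh
theorem pv_innerA (files : List String) (n : String) (ps : List String) (acc : List String) :
    files.foldl (fun acc2 file =>
        if ps.any (fun pat => PySem.Str.isIn pat (PySem.Str.lower file)) then
          if acc2.contains n then acc2 else acc2 ++ [n]
        else acc2) acc
      = if acc.contains n then acc else if pvMatch files ps then acc ++ [n] else acc := by
  induction files generalizing acc with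
  | nil => simp [pvMatch]
  | cons f fs ih =>
    have hpv : pvMatch (f :: fs) ps
        = (ps.any (fun pat => PySem.Str.isIn pat (PySem.Str.lower f)) || pvMatch fs ps) := by
      simp [pvMatch]
    rw [List.foldl_cons, hpv]
    by_cases h : ps.any (fun pat => PySem.Str.isIn pat (PySem.Str.lower f)) = true
    · rw [h]
      simp only [if_true, Bool.true_or]
      by_cases hc : acc.contains n = true
      · rw [if_pos hc, ih, if_pos hc]
      · rw [if_neg hc, ih, if_pos (show (acc ++ [n]).contains n = true by simp)]
    · rw [Bool.not_eq_true] at h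
      rw [h]
      simp only [Bool.false_eq_true, if_false, Bool.false_or]
      exact ih acc

-- A's outer loop as a filter of the entry list (needs distinct provider names)
theorem pv_outerA (ai_files : List String) (entries : List (String × List String))
    (acc : List String) (hnd : (entries.map Prod.fst).Nodup)
    (hacc : ∀ e ∈ entries, ¬ e.1 ∈ acc) :
    entries.foldl (fun acc e =>
        ai_files.foldl (fun acc2 file =>
          if e.2.any (fun pat => PySem.Str.isIn pat (PySem.Str.lower file)) then
            if acc2.contains e.1 then acc2 else acc2 ++ [e.1]
          else acc2) acc) acc
      = acc ++ (entries.filter (fun e => pvMatch ai_files e.2)).map Prod.fst := by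
  induction entries generalizing acc with
  | nil => simp
  | cons e es ih =>
    simp only [List.map_cons, List.nodup_cons] at hnd
    have hfresh : ¬ e.1 ∈ acc := hacc e (List.mem_cons_self ..)
    rw [List.foldl_cons, pv_innerA, if_neg (by simpa using hfresh)]
    by_cases hm : pvMatch ai_files e.2 = true
    · rw [if_pos hm, ih (acc ++ [e.1]) hnd.2 ?_]
      · simp [hm]
      · intro e' he'
        simp only [List.mem_append, List.mem_singleton, not_or]
        refine ⟨hacc e' (List.mem_cons_of_mem _ he'), ?_⟩
        intro hfst
        exact hnd.1 (hfst ▸ List.mem_map_of_mem he')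
    · rw [Bool.not_eq_true] at hm
      rw [if_neg (by simp [hm]), ih acc hnd.2 (fun e' he' => hacc e' (List.mem_cons_of_mem _ he'))]
      simp [hm]

-- a prefix of as ++ c :: bs avoiding c stops inside as
theorem pv_prefix_stop {c : Char} {sub as bs : List Char} (hc : c ∉ sub)
    (h : sub <+: as ++ c :: bs) : sub <+: as := by
  have hlen : sub.length ≤ as.length := by
    by_contra hl
    rw [not_le] at hl
    obtain ⟨t, ht⟩ := h
    apply hc
    have h1 : (sub ++ t)[as.length]'(by simp; omega) = sub[as.length]'(by omega) :=
      List.getElem_append_left (by omega)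
    have h2 : (sub ++ t)[as.length]'(by simp; omega) = c := by
      simp only [ht]
      rw [List.getElem_append_right (le_refl _)]
      simp
    exact (h1.symm.trans h2) ▸ List.getElem_mem _
  obtain ⟨t, ht⟩ := h
  have : sub = as.take sub.length := by
    rw [← List.take_append_of_le_length hlen, ← ht]
    simp
  exact this ▸ List.take_prefix _ _

-- an infix of as ++ c :: bs avoiding c lies wholly in as or wholly in bs
theorem pv_infix_split {c : Char} (sub : List Char) (as bs : List Char) (hc : c ∉ sub) :
    sub <:+: as ++ c :: bs ↔ sub <:+: as ∨ sub <:+: bs := by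
  constructor
  · intro h
    induction as with
    | nil =>
      rcases List.infix_cons_iff.mp h with hp | hi
      · cases sub with
        | nil => exact Or.inl List.nil_infix
        | cons s ss =>
          obtain ⟨t, ht⟩ := hp
          simp only [List.cons_append, List.cons.injEq] at ht
          exact absurd (ht.1 ▸ List.mem_cons_self ..) hc
      · exact Or.inr hi
    | cons a as ih =>
      rcases List.infix_cons_iff.mp h with hp | hi
      · exact Or.inl (pv_prefix_stop hc (by simpa using hp)).isInfix
      · rcases ih hi with h' | h'
        · exact Or.inl (h'.trans (List.infix_cons List.infix_rfl))
        · exact Or.inr h'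
  · rintro (h | h)
    · exact h.trans ⟨[], c :: bs, by simp⟩
    · exact h.trans ⟨as ++ [c], [], by simp⟩

-- a nonempty pattern avoiding the separator is an infix of the joined blob
-- iff it is an infix of one of the parts
theorem pv_infix_intercalate (c : Char) (sub : List Char) (parts : List (List Char))
    (hc : c ∉ sub) (hne : sub ≠ []) :
    sub <:+: [c].intercalate parts ↔ ∃ x ∈ parts, sub <:+: x := by
  induction parts with
  | nil => simp [List.intercalate, List.infix_nil, hne]
  | cons x xs ih =>
    cases xs with
    | nil => simp [List.intercalate]
    | cons y ys =>
      have hstep : [c].intercalate (x :: y :: ys) = x ++ c :: [c].intercalate (y :: ys) := by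
        simp [List.intercalate]
      rw [hstep, pv_infix_split sub x _ hc, ih]
      simp only [List.mem_cons]
      constructor
      · rintro (h | ⟨z, hz, h⟩)
        · exact ⟨x, Or.inl rfl, h⟩
        · exact ⟨z, Or.inr hz, h⟩
      · rintro ⟨z, rfl | hz, h⟩
        · exact Or.inl h
        · exact Or.inr ⟨z, hz, h⟩

-- lowering distributes over the intercalated blob (lowerChar is applied charwise, ' ' is fixed)
theorem pv_lower_intercalate (parts : List (List Char)) :
    PySem.Chars.lower ([' '].intercalate parts)
      = [' '].intercalate (parts.map PySem.Chars.lower) := by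
  induction parts with
  | nil => simp [List.intercalate, PySem.Chars.lower]
  | cons x xs ih =>
    cases xs with
    | nil => simp [List.intercalate]
    | cons y ys =>
      have hstep : ∀ (a b : List Char) (l : List (List Char)), [' '].intercalate (a :: b :: l)
          = a ++ ' ' :: [' '].intercalate (b :: l) := by
        intro a b l; simp [List.intercalate]
      have hsp : PySem.Chars.lowerChar ' ' = ' ' := by decide
      rw [hstep, List.map_cons, List.map_cons, hstep, ← List.map_cons, ← ih]
      simp only [PySem.Chars.lower, List.map_append, List.map_cons, hsp]

-- every pattern in the table is nonempty and space-free
theorem pv_patterns_ok : ∀ e ∈ pvProviderPatterns, ∀ p ∈ e.2,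
    p.toList ≠ [] ∧ ' ' ∉ p.toList := by decide

-- per provider entry: searching the lowered blob equals A's per-file match condition
theorem pv_entry_eq (ai_files : List String) (e : String × List String)
    (he : e ∈ pvProviderPatterns) :
    e.2.any (fun p => PySem.Str.isIn p (PySem.Str.lower (PySem.Str.join " " ai_files)))
      = pvMatch ai_files e.2 := by
  have hblob : (PySem.Str.lower (PySem.Str.join " " ai_files)).toList
      = [' '].intercalate (ai_files.map (fun f => PySem.Chars.lower f.toList)) := by
    rw [PySem.Str.toList_lower, PySem.Str.toList_join]
    show PySem.Chars.lower (List.intercalate [' '] _) = _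
    rw [pv_lower_intercalate, List.map_map]
    rfl
  rw [Bool.eq_iff_iff]
  simp only [List.any_eq_true, pvMatch]
  constructor
  · rintro ⟨p, hp, hin⟩
    obtain ⟨hne, hsp⟩ := pv_patterns_ok e he p hp
    rw [PySem.Str.isIn_iff_infix, hblob, pv_infix_intercalate _ _ _ hsp hne] at hin
    obtain ⟨x, hx, hinf⟩ := hin
    obtain ⟨f, hf, rfl⟩ := List.mem_map.mp hx
    refine ⟨f, hf, p, hp, ?_⟩
    rw [PySem.Str.isIn_iff_infix, PySem.Str.toList_lower]
    exact hinf
  · rintro ⟨f, hf, p, hp, hin⟩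
    obtain ⟨hne, hsp⟩ := pv_patterns_ok e he p hp
    rw [PySem.Str.isIn_iff_infix, PySem.Str.toList_lower] at hin
    refine ⟨p, hp, ?_⟩
    rw [PySem.Str.isIn_iff_infix, hblob, pv_infix_intercalate _ _ _ hsp hne]
    exact ⟨PySem.Chars.lower f.toList, List.mem_map_of_mem hf, hin⟩

-- ===== VERDICT (by name: the statement is the Claim_ definition above) =====
theorem detect_ai_providers_py_spec : Claim_equal_detect_ai_providers_py := by
  intro ai_files _
  unfold Spec_detect_ai_providers_py
  simp only [detect_ai_providers_py, detect_ai_providers_py_alt]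
  rw [pv_outerA ai_files pvProviderPatterns [] (by decide) (by simp)]
  have hf := List.filter_congr (l := pvProviderPatterns)
    (p := fun e => pvMatch ai_files e.2)
    (q := fun e => e.2.any (fun p =>
      PySem.Str.isIn p (PySem.Str.lower (PySem.Str.join " " ai_files))))
    (fun e he => (pv_entry_eq ai_files e he).symm)
  rw [hf, List.nil_append]
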